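-- pv_equiv track=rewrite | github.com/mjenrungrot/autolab | src/autolab/utils.py | _snapshot_delta_paths
-- ===== SOURCE A (Python) =====
-- def _snapshot_delta_paths(
--     baseline_snapshot: dict[str, str], current_snapshot: dict[str, str]
-- ) -> list[str]:
--     delta_paths = [
--         path
--         for path, signature in current_snapshot.items()
--         if baseline_snapshot.get(path) != signature
--     ]
--     return sorted(delta_paths)
-- ===== SOURCE B (Python) =====
-- def _snapshot_delta_paths(baseline_snapshot, current_snapshot):
--     cur = sorted(current_snapshot.items(), key=lambda kv: kv[0])
--     base = sorted(baseline_snapshot.items(), key=lambda kv: kv[0])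
--     out = []
--     j = 0
--     n = len(base)
--     for path, sig in cur:
--         while j < n and base[j][0] < path:
--             j += 1
--         if j < n and base[j][0] == path and base[j][1] == sig:
--             j += 1
--             continue
--         out.append(path)
--     return out
-- ===== Notes on version B (the rewrite author's own statement) =====
-- stated objective: alternative
-- what changed: B sorts both snapshots' item lists by path once and runs a two-pointer merge scan that emits changed/new paths already in sorted order, replacing A's per-path baseline.get lookup comprehension followed by a final sort.
import Mathlib
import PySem

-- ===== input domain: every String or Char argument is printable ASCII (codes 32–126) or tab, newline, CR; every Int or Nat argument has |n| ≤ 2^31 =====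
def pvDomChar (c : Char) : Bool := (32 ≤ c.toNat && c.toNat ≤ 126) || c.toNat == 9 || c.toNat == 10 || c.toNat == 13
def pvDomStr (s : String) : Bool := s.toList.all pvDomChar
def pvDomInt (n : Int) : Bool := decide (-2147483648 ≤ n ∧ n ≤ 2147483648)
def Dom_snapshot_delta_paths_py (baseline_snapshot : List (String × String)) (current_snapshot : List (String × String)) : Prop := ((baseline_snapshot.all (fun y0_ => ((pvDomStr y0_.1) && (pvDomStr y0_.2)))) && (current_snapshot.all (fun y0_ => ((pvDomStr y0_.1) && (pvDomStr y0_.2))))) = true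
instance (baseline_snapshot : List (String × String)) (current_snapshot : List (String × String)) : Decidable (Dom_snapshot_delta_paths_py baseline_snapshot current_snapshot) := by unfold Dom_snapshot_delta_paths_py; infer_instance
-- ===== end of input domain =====

-- B sorts both snapshots' items by path and emits changed/new paths by a two-pointer
-- merge scan (already sorted), instead of A's per-path get lookup plus a final sort.


-- ===== PORT A =====
def snapshot_delta_paths_py (baseline_snapshot : List (String × String)) (current_snapshot : List (String × String)) : List String :=
  let delta_paths : List String :=
    (current_snapshot.filter (fun p =>
      decide ((PySem.Dict.mk baseline_snapshot).get? p.1 ≠ some p.2))).map (fun p => p.1)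
  PySem.List.sorted delta_paths (fun x => x) false

-- ===== PORT B =====
-- the for/while two-pointer loop of Source B, as recursion on the two remaining suffixes
def pvMergeDelta : List (String × String) → List (String × String) → List String
  | [], _ => []
  | c :: cs, [] => c.1 :: pvMergeDelta cs []
  | c :: cs, b :: bs =>
      if b.1 < c.1 then pvMergeDelta (c :: cs) bs            -- while: skip baseline entries below path
      else if b.1 = c.1 ∧ b.2 = c.2 then pvMergeDelta cs bs  -- unchanged pair: emit nothing
      else c.1 :: pvMergeDelta cs (b :: bs)                  -- new or changed: emit path
  termination_by cs bs => cs.length + bs.length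

def snapshot_delta_paths_py_alt (baseline_snapshot : List (String × String)) (current_snapshot : List (String × String)) : List String :=
  let cur := PySem.List.sorted current_snapshot (fun kv => kv.1) false
  let base := PySem.List.sorted baseline_snapshot (fun kv => kv.1) false
  pvMergeDelta cur base

-- ===== PRECONDITION & SPEC =====
-- Pre_ excludes association lists with duplicate keys: those do not represent a Python dict
-- (A's arguments are dicts, whose keys are unique), so nothing is claimed about them.
def Pre_snapshot_delta_paths_py (baseline_snapshot : List (String × String)) (current_snapshot : List (String × String)) : Prop :=
  (baseline_snapshot.map Prod.fst).Nodup ∧ (current_snapshot.map Prod.fst).Nodup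
instance (baseline_snapshot : List (String × String)) (current_snapshot : List (String × String)) : Decidable (Pre_snapshot_delta_paths_py baseline_snapshot current_snapshot) := by unfold Pre_snapshot_delta_paths_py; infer_instance

def pvWitness_snapshot_delta_paths_py : (List (String × String)) × (List (String × String)) :=
  ([("a", "1"), ("b", "2")], [("a", "1"), ("b", "3"), ("c", "4")])

def Spec_snapshot_delta_paths_py (baseline_snapshot : List (String × String)) (current_snapshot : List (String × String)) (out : List String) : Prop := out = snapshot_delta_paths_py_alt baseline_snapshot current_snapshot
instance (baseline_snapshot : List (String × String)) (current_snapshot : List (String × String)) (out : List String) : Decidable (Spec_snapshot_delta_paths_py baseline_snapshot current_snapshot out) := by unfold Spec_snapshot_delta_paths_py; infer_instance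

-- ===== CLAIM (what is proved, stated in full; the proofs are below) =====
def Claim_equal_snapshot_delta_paths_py : Prop := ∀ (baseline_snapshot : List (String × String)) (current_snapshot : List (String × String)), Dom_snapshot_delta_paths_py baseline_snapshot current_snapshot → Pre_snapshot_delta_paths_py baseline_snapshot current_snapshot → Spec_snapshot_delta_paths_py baseline_snapshot current_snapshot (snapshot_delta_paths_py baseline_snapshot current_snapshot)

-- ===== LEMMAS AND PROOFS =====

-- With unique baseline keys, `baseline.get(path) == signature` is exactly pair membership.
theorem pv_get_eq_mem (b : List (String × String)) (hb : (b.map Prod.fst).Nodup)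
    (p : String × String) :
    ((PySem.Dict.mk b).get? p.1 = some p.2) ↔ p ∈ b := by
  have hk : (PySem.Dict.mk b).keys.Nodup := by
    simpa [PySem.Dict.keys] using hb
  simpa [PySem.Dict.items] using
    PySem.Dict.get?_eq_some_iff_mem_items (PySem.Dict.mk b) p.1 p.2 hk

-- On key-strictly-increasing lists the merge scan computes exactly
-- "paths of current pairs absent from baseline".
theorem pv_merge_eq_filter :
    ∀ (cs bs : List (String × String)),
      cs.Pairwise (fun p q => p.1 < q.1) → bs.Pairwise (fun p q => p.1 < q.1) →
      pvMergeDelta cs bs = (cs.filter (fun p => decide (p ∉ bs))).map Prod.fst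
  | [], _, _, _ => by simp [pvMergeDelta]
  | c :: cs, [], hc, _ => by
      simp [pvMergeDelta, pv_merge_eq_filter cs [] hc.of_cons List.Pairwise.nil]
  | c :: cs, b :: bs, hc, hb => by
      by_cases h1 : b.1 < c.1
      · rw [pvMergeDelta, if_pos h1,
          pv_merge_eq_filter (c :: cs) bs hc hb.of_cons]
        congr 1
        apply List.filter_congr
        intro p hp
        have hbp : b.1 < p.1 := by
          rcases List.mem_cons.mp hp with h | h
          · subst h; exact h1
          · exact lt_trans h1 (List.rel_of_pairwise_cons hc h)
        have hpb : p ≠ b := fun h => by subst h; exact lt_irrefl _ hbp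
        simp [hpb]
      · by_cases h2 : b.1 = c.1 ∧ b.2 = c.2
        · have hbc : b = c := Prod.ext h2.1 h2.2
          rw [pvMergeDelta, if_neg h1, if_pos h2,
            pv_merge_eq_filter cs bs hc.of_cons hb.of_cons]
          rw [List.filter_cons_of_neg (by simp [← hbc])]
          congr 1
          apply List.filter_congr
          intro p hp
          have hbp : b.1 < p.1 := h2.1 ▸ List.rel_of_pairwise_cons hc hp
          have hpb : p ≠ b := fun h => by subst h; exact lt_irrefl _ hbp
          simp [hpb]
        · rw [pvMergeDelta, if_neg h1, if_neg h2,
            pv_merge_eq_filter cs (b :: bs) hc.of_cons hb]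
          have hcb : c ∉ b :: bs := by
            intro hmem
            rcases List.mem_cons.mp hmem with h | h
            · subst h; exact h2 ⟨rfl, rfl⟩
            · exact h1 (List.rel_of_pairwise_cons hb h)
          rw [List.filter_cons_of_pos (by simpa using hcb)]
          simp

-- sorting pairs with unique keys by their key gives a key-strictly-increasing list
theorem pv_sorted_pairwise_lt (l : List (String × String))
    (h : (l.map Prod.fst).Nodup) :
    (PySem.List.sorted l (fun kv => kv.1) false).Pairwise (fun p q => p.1 < q.1) := by
  have hle := PySem.List.sorted_pairwise l (fun kv => kv.1)
  have hperm : (PySem.List.sorted l (fun kv => kv.1) false).Perm l :=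
    PySem.List.sorted_perm l (fun kv => kv.1) false
  have hnd : ((PySem.List.sorted l (fun kv => kv.1) false).map Prod.fst).Nodup :=
    (hperm.map Prod.fst).nodup_iff.mpr h
  have hne : (PySem.List.sorted l (fun kv => kv.1) false).Pairwise
      (fun p q => p.1 ≠ q.1) := by
    rw [← List.pairwise_map (f := Prod.fst)]
    exact hnd
  exact (hle.and hne).imp (fun h => lt_of_le_of_ne h.1 h.2)

-- ===== VERDICT (by name: the statement is the Claim_ definition above) =====
theorem snapshot_delta_paths_py_spec : Claim_equal_snapshot_delta_paths_py := by
  intro b c _ hpre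
  obtain ⟨hb, hc⟩ := hpre
  unfold Spec_snapshot_delta_paths_py snapshot_delta_paths_py snapshot_delta_paths_py_alt
  set cs := PySem.List.sorted c (fun kv => kv.1) false with hcs
  set bs := PySem.List.sorted b (fun kv => kv.1) false with hbs
  have hcsp : cs.Perm c := PySem.List.sorted_perm c (fun kv => kv.1) false
  have hbsp : bs.Perm b := PySem.List.sorted_perm b (fun kv => kv.1) false
  rw [pv_merge_eq_filter cs bs (pv_sorted_pairwise_lt c hc) (pv_sorted_pairwise_lt b hb)]
  -- A's filter predicate is pair non-membership in the baseline
  have hfa : c.filter (fun p => decide ((PySem.Dict.mk b).get? p.1 ≠ some p.2))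
      = c.filter (fun p => decide (p ∉ bs)) := by
    apply List.filter_congr
    intro p _
    have h1 := pv_get_eq_mem b hb p
    have h2 : p ∈ bs ↔ p ∈ b := hbsp.mem_iff
    simp [h1, h2]
  rw [hfa]
  -- both sides are a permutation of the same list and the RHS is strictly increasing
  apply PySem.List.sorted_eq_of_perm_of_pairwise_lt
  · exact (hcsp.filter _).map Prod.fst
  · have := (pv_sorted_pairwise_lt c hc).filter (fun p => decide (p ∉ bs))
    rw [← List.pairwise_map (f := Prod.fst)] at this
    exact this.imp (fun h => h)
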